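-- pv_equiv track=rewrite | github.com/patidar12/Programs | cdnjs/DynamicProgramming/balikaVadhu27.py | lcsR
-- ===== SOURCE A (Python) =====
-- def ascii(char):
--     return ord(char)
--
-- def lcsR(s1, s2, k):
--     if(k == 0):
--         return 0
--     if(len(s1) == 0 or len(s2) == 0):
--         return -2**31
--     ans = 0
--     if(s1[0] == s2[0]):
--         opt1 = ascii(s1[0]) + lcsR(s1[1:], s2[1:],k-1)
--         opt2 = lcsR(s1[1:],s2,k)
--         opt3 = lcsR(s1,s2[1:],k)
--         ans = max(opt1,max(opt2,opt3))
--     else: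
--         first = lcsR(s1[1:],s2,k)
--         second = lcsR(s1,s2[1:],k)
--         ans = max(first, second)
--     return ans
-- ===== SOURCE B (Python) =====
-- def lcsR(s1, s2, k):
--     n, m = len(s1), len(s2)
--     memo = {}
--
--     def go(i, j, kk):
--         if kk == 0:
--             return 0
--         if i == n or j == m:
--             return -2**31
--         key = (i, j, kk)
--         if key in memo:
--             return memo[key]
--         if s1[i] == s2[j]:
--             r = max(ord(s1[i]) + go(i + 1, j + 1, kk - 1),
--                     go(i + 1, j, kk),
--                     go(i, j + 1, kk))
--         else:
--             r = max(go(i + 1, j, kk), go(i, j + 1, kk))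
--         memo[key] = r
--         return r
--
--     return go(0, 0, k)
-- ===== Notes on version B (the rewrite author's own statement) =====
-- stated objective: alternative
-- what changed: Replaced A's branching recursion on string slices with the same recurrence memoized over (i, j, k) index triples, so each state is computed at most once.
import Mathlib
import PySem

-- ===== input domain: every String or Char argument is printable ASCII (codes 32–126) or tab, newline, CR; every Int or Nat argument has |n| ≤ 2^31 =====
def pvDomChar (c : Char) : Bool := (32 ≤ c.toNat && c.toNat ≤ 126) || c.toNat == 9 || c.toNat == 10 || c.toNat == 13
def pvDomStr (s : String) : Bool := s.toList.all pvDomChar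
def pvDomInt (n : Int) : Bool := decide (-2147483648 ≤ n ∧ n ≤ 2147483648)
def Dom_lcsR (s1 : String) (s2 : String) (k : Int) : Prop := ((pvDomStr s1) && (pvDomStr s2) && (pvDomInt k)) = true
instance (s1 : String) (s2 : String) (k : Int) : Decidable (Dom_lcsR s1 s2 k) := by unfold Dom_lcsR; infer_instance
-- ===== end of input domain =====

-- B replaces A's slice-and-recurse with the same recurrence memoized over (i, j, k) index triples.

-- ===== PORT A =====
-- A recurses on the two strings, peeling s1[0]/s2[0] and slicing s1[1:], s2[1:]:
-- ported as structural recursion on the character lists (the slices ARE the tails).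
def lcsRA (s1 : List Char) (s2 : List Char) (k : Int) : Int :=
  if k = 0 then 0
  else
    match s1, s2 with
    | [], _ => -(2 ^ 31)                    -- len(s1) == 0
    | _, [] => -(2 ^ 31)                    -- len(s2) == 0
    | c1 :: t1, c2 :: t2 =>
      if c1 = c2 then
        let opt1 := (c1.toNat : Int) + lcsRA t1 t2 (k - 1)
        let opt2 := lcsRA t1 (c2 :: t2) k
        let opt3 := lcsRA (c1 :: t1) t2 k
        max opt1 (max opt2 opt3)
      else
        let first := lcsRA t1 (c2 :: t2) k
        let second := lcsRA (c1 :: t1) t2 k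
        max first second
termination_by s1.length + s2.length
decreasing_by all_goals simp <;> omega

def lcsR (s1 : String) (s2 : String) (k : Int) : Int :=
  lcsRA s1.toList s2.toList k

-- ===== PORT B =====
-- Source B's inner go(i, j, kk) with its memo dict threaded through explicitly.
-- The guard is written `a.length ≤ i` (Python: `i == n`): go is only ever called with
-- i ≤ n, j ≤ m, where the two tests coincide; ≤ makes the recursion total.
def goB (a : List Char) (b : List Char) (i : Nat) (j : Nat) (kk : Int)
    (memo : PySem.Dict (Nat × Nat × Int) Int) :
    Int × PySem.Dict (Nat × Nat × Int) Int :=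
  if kk = 0 then (0, memo)
  else if a.length ≤ i ∨ b.length ≤ j then (-(2 ^ 31), memo)
  else
    match memo.get? (i, j, kk) with
    | some v => (v, memo)
    | none =>
      if a.getD i ' ' = b.getD j ' ' then   -- s1[i] == s2[j] (in range: guard above)
        let (r1, m1) := goB a b (i + 1) (j + 1) (kk - 1) memo
        let (r2, m2) := goB a b (i + 1) j kk m1
        let (r3, m3) := goB a b i (j + 1) kk m2
        ((max ((a.getD i ' ').toNat + r1 : Int) (max r2 r3)),
          m3.insert (i, j, kk) (max ((a.getD i ' ').toNat + r1 : Int) (max r2 r3)))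
      else
        let (r1, m1) := goB a b (i + 1) j kk memo
        let (r2, m2) := goB a b i (j + 1) kk m1
        (max r1 r2, m2.insert (i, j, kk) (max r1 r2))
termination_by (a.length - i) + (b.length - j)
decreasing_by all_goals omega

def lcsR_alt (s1 : String) (s2 : String) (k : Int) : Int :=
  (goB s1.toList s2.toList 0 0 k PySem.Dict.empty).1

-- ===== PRECONDITION & SPEC =====
def Spec_lcsR (s1 : String) (s2 : String) (k : Int) (out : Int) : Prop := out = lcsR_alt s1 s2 k
instance (s1 : String) (s2 : String) (k : Int) (out : Int) : Decidable (Spec_lcsR s1 s2 k out) := by unfold Spec_lcsR; infer_instance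

-- ===== CLAIM (what is proved, stated in full; the proofs are below) =====
def Claim_equal_lcsR : Prop := ∀ (s1 : String) (s2 : String) (k : Int), Dom_lcsR s1 s2 k → Spec_lcsR s1 s2 k (lcsR s1 s2 k)

-- ===== LEMMAS AND PROOFS =====

-- Pure version of goB (proof-only): the value go(i,j,kk) computes, without the memo.
def goP (a : List Char) (b : List Char) (i : Nat) (j : Nat) (kk : Int) : Int :=
  if kk = 0 then 0
  else if a.length ≤ i ∨ b.length ≤ j then -(2 ^ 31)
  else if a.getD i ' ' = b.getD j ' ' then
    max ((a.getD i ' ').toNat + goP a b (i + 1) (j + 1) (kk - 1) : Int)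
      (max (goP a b (i + 1) j kk) (goP a b i (j + 1) kk))
  else
    max (goP a b (i + 1) j kk) (goP a b i (j + 1) kk)
termination_by (a.length - i) + (b.length - j)
decreasing_by all_goals omega

-- memo invariant: every cached value is the pure value
def MemoOK (a b : List Char) (memo : PySem.Dict (Nat × Nat × Int) Int) : Prop :=
  ∀ i j kk v, memo.get? (i, j, kk) = some v → v = goP a b i j kk

theorem goB_correct (a b : List Char) (i j : Nat) (kk : Int)
    (memo : PySem.Dict (Nat × Nat × Int) Int) :
    MemoOK a b memo →
      (goB a b i j kk memo).1 = goP a b i j kk ∧ MemoOK a b (goB a b i j kk memo).2 := by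
  induction i, j, kk, memo using goB.induct a b with
  | case1 i j memo =>
    intro h
    rw [goB, goP]; simp [h]
  | case2 i j kk memo hk hg =>
    intro h
    rw [goB, goP]; simp [hk, hg, h]
  | case3 i j kk memo hk hg v hget =>
    intro h
    rw [goB]
    simp only [if_neg hk, if_neg hg, hget]
    exact ⟨h i j kk v hget, h⟩
  | case4 i j kk memo hk hg hget hc r1 m1 heq1 r2 m2 heq2 r3 m3 heq3 ih1 ih2 ih3 =>
    intro h
    simp only [heq1] at ih1
    obtain ⟨hv1, hm1⟩ := ih1 h
    simp only [heq2] at ih2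
    obtain ⟨hv2, hm2⟩ := ih2 hm1
    simp only [heq3] at ih3
    obtain ⟨hv3, hm3⟩ := ih3 hm2
    have hval : max ((a.getD i ' ').toNat + r1 : Int) (max r2 r3) = goP a b i j kk := by
      rw [goP]; simp only [if_neg hk, if_neg hg, if_pos hc]; rw [hv1, hv2, hv3]
    rw [goB]
    simp only [if_neg hk, if_neg hg, hget, if_pos hc, heq1, heq2, heq3]
    refine ⟨hval, ?_⟩
    intro i' j' kk' v' hv'
    rw [PySem.Dict.get?_insert] at hv'
    by_cases hk' : ((i' : Nat), (j' : Nat), (kk' : Int)) = (i, j, kk)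
    · rw [if_pos hk'] at hv'
      cases hv'
      simp only [Prod.mk.injEq] at hk'
      obtain ⟨e1, e2, e3⟩ := hk'
      subst e1; subst e2; subst e3
      exact hval
    · rw [if_neg hk'] at hv'
      exact hm3 i' j' kk' v' hv'
  | case5 i j kk memo hk hg hget hc r1 m1 heq1 r2 m2 heq2 ih1 ih2 =>
    intro h
    simp only [heq1] at ih1
    obtain ⟨hv1, hm1⟩ := ih1 h
    simp only [heq2] at ih2
    obtain ⟨hv2, hm2⟩ := ih2 hm1
    have hval : max r1 r2 = goP a b i j kk := by
      rw [goP]; simp only [if_neg hk, if_neg hg, if_neg hc]; rw [hv1, hv2]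
    rw [goB]
    simp only [if_neg hk, if_neg hg, hget, if_neg hc, heq1, heq2]
    refine ⟨hval, ?_⟩
    intro i' j' kk' v' hv'
    rw [PySem.Dict.get?_insert] at hv'
    by_cases hk' : ((i' : Nat), (j' : Nat), (kk' : Int)) = (i, j, kk)
    · rw [if_pos hk'] at hv'
      cases hv'
      simp only [Prod.mk.injEq] at hk'
      obtain ⟨e1, e2, e3⟩ := hk'
      subst e1; subst e2; subst e3
      exact hval
    · rw [if_neg hk'] at hv'
      exact hm2 i' j' kk' v' hv'

-- lcsRA returns the sentinel on an empty side (k ≠ 0)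
theorem lcsRA_empty (x y : List Char) (k : Int) (hk : k ≠ 0) (h : x = [] ∨ y = []) :
    lcsRA x y k = -(2 ^ 31) := by
  rcases h with h | h
  · subst h; rw [lcsRA.eq_def]; simp [hk]
  · subst h; rw [lcsRA.eq_def]; cases x <;> simp [hk]

theorem goP_eq_lcsRA (a b : List Char) (i j : Nat) (kk : Int) :
    i ≤ a.length → j ≤ b.length → goP a b i j kk = lcsRA (a.drop i) (b.drop j) kk := by
  induction i, j, kk using goP.induct a b with
  | case1 i j =>
    intro _ _
    rw [goP, lcsRA.eq_def]; simp
  | case2 i j kk hk hg =>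
    intro hi hj
    rw [goP]
    rw [lcsRA_empty _ _ _ hk]
    · simp [hk, hg]
    · rcases hg with hg | hg
      · left; simpa using List.drop_eq_nil_iff.mpr (by omega)
      · right; simpa using List.drop_eq_nil_iff.mpr (by omega)
  | case3 i j kk hk hg hc ih1 ih2 ih3 =>
    intro hi hj
    have hia : i < a.length := by omega
    have hjb : j < b.length := by omega
    have hda : a.drop i = a[i] :: a.drop (i + 1) := List.drop_eq_getElem_cons hia
    have hdb : b.drop j = b[j] :: b.drop (j + 1) := List.drop_eq_getElem_cons hjb
    have hga : a.getD i ' ' = a[i] := List.getD_eq_getElem a ' ' hia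
    have hgb : b.getD j ' ' = b[j] := List.getD_eq_getElem b ' ' hjb
    have hc' : a[i] = b[j] := by rw [← hga, ← hgb]; exact hc
    rw [goP]
    simp only [if_neg hk, if_neg hg, if_pos hc]
    rw [hda, hdb, lcsRA.eq_def]
    simp only [if_neg hk, if_pos hc']
    rw [ih1 (by omega) (by omega), ih2 (by omega) hj, ih3 hi (by omega)]
    rw [hda, hdb, hga, hc']
  | case4 i j kk hk hg hc ih1 ih2 =>
    intro hi hj
    have hia : i < a.length := by omega
    have hjb : j < b.length := by omega
    have hda : a.drop i = a[i] :: a.drop (i + 1) := List.drop_eq_getElem_cons hia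
    have hdb : b.drop j = b[j] :: b.drop (j + 1) := List.drop_eq_getElem_cons hjb
    have hc' : ¬ a[i] = b[j] := by
      rw [← List.getD_eq_getElem a ' ' hia, ← List.getD_eq_getElem b ' ' hjb]; exact hc
    rw [goP]
    simp only [if_neg hk, if_neg hg, if_neg hc]
    rw [hda, hdb, lcsRA.eq_def]
    simp only [if_neg hk, if_neg hc']
    rw [ih1 (by omega) hj, ih2 hi (by omega)]
    rw [hda, hdb]

-- ===== VERDICT (by name: the statement is the Claim_ definition above) =====
theorem lcsR_spec : Claim_equal_lcsR := by
  intro s1 s2 k _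
  unfold Spec_lcsR lcsR lcsR_alt
  have h1 := goB_correct s1.toList s2.toList 0 0 k PySem.Dict.empty
    (by intro i j kk v hv; simp [PySem.Dict.get?_empty] at hv)
  have h2 := goP_eq_lcsRA s1.toList s2.toList 0 0 k (Nat.zero_le _) (Nat.zero_le _)
  rw [h1.1, h2]
  simp
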